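-- pv_equiv track=rewrite | github.com/Vogelspinnetje/AdventOfCode | 2015/AoC_01_2015.py | AoC_01_2015
-- ===== SOURCE A (Python) =====
-- def AoC_01_2015(datastream: str) -> tuple[int, int]:
--     verdieping = 0
--     karakter_van_kelder = 0
--
--     for x, stappen in enumerate(datastream):
--         if stappen == "(":
--             verdieping += 1
--         else:
--             verdieping -= 1
--
--         if verdieping < 0 and karakter_van_kelder == 0:
--             karakter_van_kelder = x + 1
--
--
--     return verdieping, karakter_van_kelder
-- ===== SOURCE B (Python) =====
-- def AoC_01_2015(datastream: str) -> tuple[int, int]: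
--     # Final floor in closed form: +1 per '(' and -1 per any other char.
--     floor = datastream.count("(") * 2 - len(datastream)
--     # Independent early-exit scan for the first basement entry.
--     basement = 0
--     balance = 0
--     for i, ch in enumerate(datastream):
--         balance += 1 if ch == "(" else -1
--         if balance < 0:
--             basement = i + 1
--             break
--     return floor, basement
-- ===== Notes on version B (the rewrite author's own statement) =====
-- stated objective: alternative
-- what changed: Replaces A's single fused per-character pass carrying both the floor and the latched basement flag with a closed-form aggregate (2*count('(') - len) for the final floor plus a separate early-exit balance scan for the basement position.
import Mathlib
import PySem

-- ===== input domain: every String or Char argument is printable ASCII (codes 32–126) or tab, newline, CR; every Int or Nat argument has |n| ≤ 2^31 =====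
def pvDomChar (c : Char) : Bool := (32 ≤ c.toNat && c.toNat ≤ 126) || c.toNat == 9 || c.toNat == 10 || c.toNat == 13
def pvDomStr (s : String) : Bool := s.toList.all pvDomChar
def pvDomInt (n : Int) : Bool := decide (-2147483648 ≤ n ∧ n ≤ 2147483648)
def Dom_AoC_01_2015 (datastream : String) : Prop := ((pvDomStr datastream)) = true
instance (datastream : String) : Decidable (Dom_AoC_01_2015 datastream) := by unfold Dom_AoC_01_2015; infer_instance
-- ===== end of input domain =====

-- B replaces A's single fused pass with a closed-form final floor (2*count('(') - len)
-- plus an independent early-exit balance scan for the basement position (alternative decomposition).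

-- ===== PORT A =====
-- A's loop over enumerate(datastream) carrying (verdieping, karakter_van_kelder) and the index x.
def pvALoop : List Char → Nat → Int → Int → Int × Int
  | [], _, v, k => (v, k)
  | c :: rest, x, v, k =>
    let v' := if c = '(' then v + 1 else v - 1
    let k' := if v' < 0 ∧ k = 0 then (x : Int) + 1 else k
    pvALoop rest (x + 1) v' k'

def AoC_01_2015 (datastream : String) : Int × Int :=
  pvALoop datastream.toList 0 0 0

-- ===== PORT B =====
-- B's early-exit scan: running balance, returns i+1 at the first index where it goes negative, else 0.
def pvBScan : List Char → Int → Nat → Int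
  | [], _, _ => 0
  | c :: rest, bal, i =>
    let b := if c = '(' then bal + 1 else bal - 1
    if b < 0 then (i : Int) + 1 else pvBScan rest b (i + 1)

def AoC_01_2015_alt (datastream : String) : Int × Int :=
  ((PySem.Str.count datastream "(" : Int) * 2 - (PySem.Str.len datastream : Int),
   pvBScan datastream.toList 0 0)

-- ===== PRECONDITION & SPEC =====
def Spec_AoC_01_2015 (datastream : String) (out : Int × Int) : Prop := out = AoC_01_2015_alt datastream
instance (datastream : String) (out : Int × Int) : Decidable (Spec_AoC_01_2015 datastream out) := by unfold Spec_AoC_01_2015; infer_instance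

-- ===== CLAIM (what is proved, stated in full; the proofs are below) =====
def Claim_equal_AoC_01_2015 : Prop := ∀ (datastream : String), Dom_AoC_01_2015 datastream → Spec_AoC_01_2015 datastream (AoC_01_2015 datastream)

-- ===== LEMMAS AND PROOFS =====

-- A's floor component: the loop adds +1 per '(' and -1 per other char, independent of x and k.
theorem pvALoop_fst (l : List Char) : ∀ (x : Nat) (v k : Int),
    (pvALoop l x v k).1 = v + 2 * (l.count '(' : Int) - (l.length : Int) := by
  induction l with
  | nil => intro x v k; simp [pvALoop]
  | cons c rest ih =>
    intro x v k
    simp only [pvALoop, ih]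
    by_cases h : c = '(' <;> simp [h] <;> ring

-- Once the basement flag is set (k ≠ 0) it never changes.
theorem pvALoop_snd_ne (l : List Char) : ∀ (x : Nat) (v k : Int), k ≠ 0 →
    (pvALoop l x v k).2 = k := by
  induction l with
  | nil => intro x v k _; simp [pvALoop]
  | cons c rest ih =>
    intro x v k hk
    simp only [pvALoop, hk, and_false, if_false]
    exact ih (x + 1) _ k hk

-- With the flag unset and a nonnegative balance, A's basement component is B's scan.
theorem pvALoop_snd_zero (l : List Char) : ∀ (x : Nat) (bal : Int), 0 ≤ bal →
    (pvALoop l x bal 0).2 = pvBScan l bal x := by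
  induction l with
  | nil => intro x bal _; simp [pvALoop, pvBScan]
  | cons c rest ih =>
    intro x bal hbal
    simp only [pvALoop, pvBScan, and_true]
    by_cases h : (if c = '(' then bal + 1 else bal - 1) < 0
    · rw [if_pos h, if_pos h]
      exact pvALoop_snd_ne rest (x + 1) _ ((x : Int) + 1) (by omega)
    · rw [if_neg h, if_neg h]
      exact ih (x + 1) _ (not_lt.mp h)

-- Python's substring count on a single-character needle is the list count of that character.
theorem pvCount_go_single (c : Char) (l : List Char) : ∀ (fuel acc : Nat), l.length ≤ fuel →
    PySem.Chars.count.go [c] fuel l acc = acc + l.count c := by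
  induction l with
  | nil => intro fuel acc _; cases fuel <;> simp [PySem.Chars.count.go]
  | cons h t ih =>
    intro fuel acc hf
    cases fuel with
    | zero => simp at hf
    | succ n =>
      by_cases hc : h = c
      · have : List.isPrefixOf [c] (h :: t) = true := by simp [List.isPrefixOf, hc]
        simp only [PySem.Chars.count.go, this, if_true, List.length_cons, List.length_nil,
          Nat.zero_add, List.drop_succ_cons, List.drop_zero]
        rw [ih n (acc + 1) (by simpa using Nat.lt_succ_iff.mp hf)]
        simp [hc]; omega
      · have : List.isPrefixOf [c] (h :: t) = false := by
          simp [List.isPrefixOf]; exact fun hh => hc hh.symm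
        simp only [PySem.Chars.count.go, this]
        rw [ih n acc (by simpa using Nat.lt_succ_iff.mp hf)]
        simp [hc]

theorem pvStrCount_single (s : String) :
    PySem.Str.count s "(" = s.toList.count '(' := by
  rw [PySem.Str.count_eq]
  show PySem.Chars.count s.toList ['('] = _
  unfold PySem.Chars.count
  simp only [List.isEmpty_iff, reduceCtorEq, if_false]
  simpa using pvCount_go_single '(' s.toList s.toList.length 0 le_rfl

-- ===== VERDICT (by name: the statement is the Claim_ definition above) =====
theorem AoC_01_2015_spec : Claim_equal_AoC_01_2015 := by
  intro s _
  unfold Spec_AoC_01_2015 AoC_01_2015 AoC_01_2015_alt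
  apply Prod.ext
  · rw [pvALoop_fst, pvStrCount_single]
    simp [PySem.Str.len_eq]
    ring
  · exact pvALoop_snd_zero s.toList 0 0 le_rfl
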